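-- pv_equiv track=rewrite | github.com/MikhailOnuchin/olimp_train | vosh_municipal/2016-17/N3.py | proximity
-- ===== SOURCE A (Python) =====
-- def proximity(gen1, gen2):
--     digrams1 = {}
--     digrams2 = {}
--     for i in range(len(gen1)-1):
--         digram = gen1[i:i + 2]
--         if digram not in digrams1.keys():
--             digrams1[digram] = 1
--         else:
--             digrams1[digram] += 1
--     for i in range(len(gen2)-1):
--         digram = gen2[i:i + 2]
--         if digram not in digrams2.keys():
--             digrams2[digram] = 1
--         else:
--             digrams2[digram] += 1
--     ans = 0
--     for digram in digrams1.keys():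
--         if digram in digrams2.keys():
--             ans += digrams1[digram]
--     return ans
-- ===== SOURCE B (Python) =====
-- def proximity(gen1, gen2):
--     digrams2 = {gen2[i:i + 2] for i in range(len(gen2) - 1)}
--     ans = 0
--     for i in range(len(gen1) - 1):
--         if gen1[i:i + 2] in digrams2:
--             ans += 1
--     return ans
-- ===== Notes on version B (the rewrite author's own statement) =====
-- stated objective: simpler
-- what changed: Drops both frequency dictionaries: B builds one set of gen2's digrams and counts positions of gen1 directly (a position contributes 1 iff its digram is in the set), instead of aggregating gen1 into a counter and then summing counts over its keys.
import Mathlib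
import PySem

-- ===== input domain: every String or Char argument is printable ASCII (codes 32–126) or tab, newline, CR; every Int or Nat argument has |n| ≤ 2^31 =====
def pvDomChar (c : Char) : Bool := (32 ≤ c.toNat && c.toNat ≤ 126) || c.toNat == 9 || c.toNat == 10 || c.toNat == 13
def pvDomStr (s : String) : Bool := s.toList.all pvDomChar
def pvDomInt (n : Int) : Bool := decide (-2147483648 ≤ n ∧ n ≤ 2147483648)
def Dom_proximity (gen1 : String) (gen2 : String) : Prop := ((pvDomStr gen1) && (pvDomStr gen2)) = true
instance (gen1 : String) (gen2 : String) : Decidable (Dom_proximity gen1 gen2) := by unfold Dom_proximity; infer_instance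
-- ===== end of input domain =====

-- B replaces A's two frequency dictionaries by a single set of gen2's digrams and a direct
-- count over gen1's positions (simpler decomposition, same result).


-- ===== PORT A =====
def proximity (gen1 : String) (gen2 : String) : Int :=
  let g1 := gen1.toList
  let g2 := gen2.toList
  let digrams1 : PySem.Dict (List Char) Int :=
    (PySem.List.pyRange 0 ((g1.length : Int) - 1) 1).foldl
      (fun d i =>
        let digram := PySem.List.slice g1 (some i) (some (i + 2))
        if !(d.contains digram) then d.insert digram 1
        else d.insert digram (d.getD digram 0 + 1))
      PySem.Dict.empty
  let digrams2 : PySem.Dict (List Char) Int :=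
    (PySem.List.pyRange 0 ((g2.length : Int) - 1) 1).foldl
      (fun d i =>
        let digram := PySem.List.slice g2 (some i) (some (i + 2))
        if !(d.contains digram) then d.insert digram 1
        else d.insert digram (d.getD digram 0 + 1))
      PySem.Dict.empty
  digrams1.keys.foldl
    (fun ans digram =>
      if digrams2.contains digram then ans + digrams1.getD digram 0 else ans)
    0

-- ===== PORT B =====
def proximity_alt (gen1 : String) (gen2 : String) : Int :=
  let g1 := gen1.toList
  let g2 := gen2.toList
  let digrams2 : PySem.Set (List Char) :=
    PySem.Set.ofList
      ((PySem.List.pyRange 0 ((g2.length : Int) - 1) 1).map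
        (fun i => PySem.List.slice g2 (some i) (some (i + 2))))
  (PySem.List.pyRange 0 ((g1.length : Int) - 1) 1).foldl
    (fun ans i =>
      if PySem.Set.contains digrams2 (PySem.List.slice g1 (some i) (some (i + 2)))
      then ans + 1 else ans)
    0

-- ===== PRECONDITION & SPEC =====
def Spec_proximity (gen1 : String) (gen2 : String) (out : Int) : Prop := out = proximity_alt gen1 gen2
instance (gen1 : String) (gen2 : String) (out : Int) : Decidable (Spec_proximity gen1 gen2 out) := by unfold Spec_proximity; infer_instance

-- ===== CLAIM (what is proved, stated in full; the proofs are below) =====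
def Claim_equal_proximity : Prop := ∀ (gen1 : String) (gen2 : String), Dom_proximity gen1 gen2 → Spec_proximity gen1 gen2 (proximity gen1 gen2)

-- ===== LEMMAS AND PROOFS =====

-- the list of digrams of g, in position order
def digs (g : List Char) : List (List Char) :=
  (PySem.List.pyRange 0 ((g.length : Int) - 1) 1).map
    (fun i => PySem.List.slice g (some i) (some (i + 2)))

-- A's counting loop over positions builds exactly the counter of the digram list
lemma loopA (g : List Char) :
    (PySem.List.pyRange 0 ((g.length : Int) - 1) 1).foldl
      (fun d i =>
        if !(d.contains (PySem.List.slice g (some i) (some (i + 2))))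
        then d.insert (PySem.List.slice g (some i) (some (i + 2))) 1
        else d.insert (PySem.List.slice g (some i) (some (i + 2)))
               (d.getD (PySem.List.slice g (some i) (some (i + 2))) 0 + 1))
      (PySem.Dict.empty : PySem.Dict (List Char) Int) = PySem.Dict.counter (digs g) := by
  have h : (PySem.List.pyRange 0 ((g.length : Int) - 1) 1).foldl
      (fun d i =>
        if !(d.contains (PySem.List.slice g (some i) (some (i + 2))))
        then d.insert (PySem.List.slice g (some i) (some (i + 2))) 1
        else d.insert (PySem.List.slice g (some i) (some (i + 2)))
               (d.getD (PySem.List.slice g (some i) (some (i + 2))) 0 + 1))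
      (PySem.Dict.empty : PySem.Dict (List Char) Int)
      = (digs g).foldl
          (fun d x =>
            if !(d.contains x) then d.insert x 1
            else d.insert x (d.getD x 0 + 1))
          PySem.Dict.empty := by
    simp only [digs, List.foldl_map]
  refine h.trans ?_
  rw [← PySem.Dict.foldl_insert_getD_add_one_eq_counter (digs g)]
  congr 1
  funext d x
  by_cases hc : d.contains x = true
  · simp [hc]
  · simp only [Bool.not_eq_true] at hc
    simp [hc, PySem.Dict.getD_of_not_contains d 0 hc]

-- B's counting loop over positions counts digrams of g that lie in s
lemma loopB (g : List Char) (s : PySem.Set (List Char)) :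
    (PySem.List.pyRange 0 ((g.length : Int) - 1) 1).foldl
      (fun ans i =>
        if PySem.Set.contains s (PySem.List.slice g (some i) (some (i + 2)))
        then ans + 1 else ans)
      (0 : Int) = ((digs g).countP (fun x => PySem.Set.contains s x) : Int) := by
  have h : (PySem.List.pyRange 0 ((g.length : Int) - 1) 1).foldl
      (fun ans i =>
        if PySem.Set.contains s (PySem.List.slice g (some i) (some (i + 2)))
        then ans + 1 else ans)
      (0 : Int)
      = (digs g).foldl (fun ans x => if PySem.Set.contains s x then ans + 1 else ans) 0 := by
    simp only [digs, List.foldl_map]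
  refine h.trans ?_
  rw [PySem.List.foldl_if_add_one, zero_add]

-- sum of if-guarded Int casts of a Nat-valued map equals the cast of the filtered Nat sum
lemma sum_ite_cast (l2 : List (List Char)) (c : List Char → Nat) :
    ∀ (u : List (List Char)),
      (u.map (fun k => if l2.contains k then (c k : Int) else 0)).sum
        = (((u.filter (fun k => l2.contains k)).map c).sum : Int) := by
  intro u
  induction u with
  | nil => simp
  | cons x xs ih =>
    cases hx : l2.contains x
    · simp only [List.map_cons, List.sum_cons, List.filter_cons, hx, Bool.false_eq_true,
        if_false, ih, zero_add]
    · simp only [List.map_cons, List.sum_cons, List.filter_cons, hx, if_true, ih,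
        List.map_cons, List.sum_cons]
      push_cast
      ring

-- A's final pass over the counter's keys computes the countP B computes
lemma core (l1 l2 : List (List Char)) :
    (PySem.Set.ofList l1).foldl
      (fun a k => if l2.contains k then a + (l1.count k : Int) else a) 0
      = (l1.countP (fun x => l2.contains x) : Int) := by
  have h1 : (fun (a : Int) k => if l2.contains k then a + (l1.count k : Int) else a)
      = fun a k => a + (if l2.contains k then (l1.count k : Int) else 0) := by
    funext a k; split <;> simp
  rw [h1, PySem.List.foldl_add, zero_add]
  have hperm : (PySem.Set.ofList l1).Perm l1.dedup :=
    (List.perm_ext_iff_of_nodup (PySem.Set.nodup_ofList l1) l1.nodup_dedup).mpr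
      (fun a => by simp [PySem.Set.mem_ofList, List.mem_dedup])
  rw [(hperm.map _).sum_eq, sum_ite_cast]
  have hl := List.sum_map_count_dedup_filter_eq_countP (fun k => l2.contains k) l1
  rw [lawful_beq_subsingleton (instBEqOfDecidableEq) (List.instBEq : BEq (List Char))] at hl
  exact_mod_cast hl

theorem proximity_spec : Claim_equal_proximity := by
  intro gen1 gen2 _
  unfold Spec_proximity proximity proximity_alt
  simp only []
  rw [loopA gen1.toList, loopA gen2.toList, loopB gen1.toList, PySem.Dict.keys_counter]
  simp only [PySem.Dict.contains_counter, PySem.Dict.getD_counter]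
  rw [core]
  norm_cast
  apply List.countP_congr
  intro x _
  rw [List.contains_iff_mem]
  constructor
  · intro h
    exact List.contains_iff_mem.mpr ((PySem.Set.mem_ofList
      ((PySem.List.pyRange 0 ((gen2.toList.length : Int) - 1) 1).map
        (fun i => PySem.List.slice gen2.toList (some i) (some (i + 2)))) x).mpr h)
  · intro h
    exact (PySem.Set.mem_ofList
      ((PySem.List.pyRange 0 ((gen2.toList.length : Int) - 1) 1).map
        (fun i => PySem.List.slice gen2.toList (some i) (some (i + 2)))) x).mp
      (List.contains_iff_mem.mp h)
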